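-- pv_equiv track=rewrite | github.com/matthewdeanmartin/gizyskon | main.py | map_interpretation_B
-- ===== SOURCE A (Python) =====
-- from typing import List, Optional, Tuple
--
-- def digit_sum(n: int) -> int:
--     return sum(int(d) for d in str(n))
--
-- def map_interpretation_B(values: List[int]) -> List[int]:
--     out = []
--     tail = 0
--     for x in reversed(values):
--         tail += x
--         y = ((digit_sum(tail) + 6 - 1) % 26) + 1
--         out.append(y)
--     return list(reversed(out))
-- ===== SOURCE B (Python) =====
-- def digit_sum(n: int) -> int:
--     return sum(int(d) for d in str(n))
--
-- def map_interpretation_B(values):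
--     suffix = sum(values)
--     out = []
--     for x in values:
--         out.append(((digit_sum(suffix) + 5) % 26) + 1)
--         suffix -= x
--     return out
-- ===== Notes on version B (the rewrite author's own statement) =====
-- stated objective: simpler
-- what changed: B computes the total once and walks the list forward with a decrementing running suffix sum, emitting each result directly in order (ported as structural recursion on the list), instead of A's reverse traversal accumulating a tail into an output list that is reversed again at the end.
import Mathlib
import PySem

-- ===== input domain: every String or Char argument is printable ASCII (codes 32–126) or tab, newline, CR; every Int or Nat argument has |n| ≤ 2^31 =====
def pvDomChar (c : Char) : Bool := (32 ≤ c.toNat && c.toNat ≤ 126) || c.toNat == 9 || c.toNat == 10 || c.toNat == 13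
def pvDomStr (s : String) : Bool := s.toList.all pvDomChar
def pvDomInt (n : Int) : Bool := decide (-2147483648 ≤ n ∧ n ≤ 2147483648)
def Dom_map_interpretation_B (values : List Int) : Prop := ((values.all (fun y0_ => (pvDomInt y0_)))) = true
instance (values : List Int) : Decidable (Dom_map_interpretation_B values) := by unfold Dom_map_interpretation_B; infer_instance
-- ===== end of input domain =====

-- B walks the list forward with a decrementing running suffix sum (total computed once),
-- emitting results directly in order, instead of A's reverse traversal plus final reversal.


-- ===== PORT A =====
-- digit_sum: sum(int(d) for d in str(n)); int(d) on a digit char is its code minus 48.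
-- Exact for n ≥ 0 (Pre_ guarantees every argument is ≥ 0; for n < 0 Python raises ValueError on '-').
def pvDigitSum (n : Int) : Int :=
  ((PySem.Int.toStr n).toList.map (fun c => ((c.toNat : Int) - 48))).sum

def map_interpretation_B (values : List Int) : List Int :=
  (values.reverse.foldl
    (fun (acc : List Int × Int) x =>
      let tail := acc.2 + x
      (acc.1 ++ [PySem.Int.mod (pvDigitSum tail + 6 - 1) 26 + 1], tail))
    ([], 0)).1.reverse

-- ===== PORT B =====
-- B's forward loop with the decrementing suffix accumulator, as structural recursion:
-- each step emits one output value and passes suffix - x to the rest.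
def pvAltGo : Int → List Int → List Int
  | _, [] => []
  | suffix, x :: rest =>
      (PySem.Int.mod (pvDigitSum suffix + 5) 26 + 1) :: pvAltGo (suffix - x) rest

def map_interpretation_B_alt (values : List Int) : List Int :=
  pvAltGo values.sum values

-- ===== PRECONDITION & SPEC =====
-- Pre_ excludes inputs with a negative suffix sum: there both Pythons raise ValueError
-- (digit_sum hits the '-' character of str(negative)).
def Pre_map_interpretation_B (values : List Int) : Prop :=
  ∀ i ∈ List.range values.length, 0 ≤ (values.drop i).sum
instance (values : List Int) : Decidable (Pre_map_interpretation_B values) := by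
  unfold Pre_map_interpretation_B; infer_instance
def pvWitness_map_interpretation_B : List Int := [3, -2, 10, 7]

def Spec_map_interpretation_B (values : List Int) (out : List Int) : Prop := out = map_interpretation_B_alt values
instance (values : List Int) (out : List Int) : Decidable (Spec_map_interpretation_B values out) := by unfold Spec_map_interpretation_B; infer_instance

-- ===== CLAIM (what is proved, stated in full; the proofs are below) =====
def Claim_equal_map_interpretation_B : Prop := ∀ (values : List Int), Dom_map_interpretation_B values → Pre_map_interpretation_B values → Spec_map_interpretation_B values (map_interpretation_B values)

-- ===== LEMMAS AND PROOFS =====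

def pvStepA (acc : List Int × Int) (x : Int) : List Int × Int :=
  (acc.1 ++ [PySem.Int.mod (pvDigitSum (acc.2 + x) + 6 - 1) 26 + 1], acc.2 + x)

theorem pvA_eq_fold (values : List Int) :
    map_interpretation_B values = (values.reverse.foldl pvStepA ([], 0)).1.reverse := by
  unfold map_interpretation_B pvStepA
  rfl

theorem pvStepA_snd (l : List Int) (pre : List Int) (s : Int) :
    (l.foldl pvStepA (pre, s)).2 = s + l.sum := by
  induction l generalizing pre s with
  | nil => simp
  | cons x t ih =>
    simp only [List.foldl_cons, pvStepA]
    rw [ih]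
    simp; ring

theorem pvA_cons (x : Int) (xs : List Int) :
    map_interpretation_B (x :: xs) =
      (PySem.Int.mod (pvDigitSum (xs.sum + x) + 6 - 1) 26 + 1) :: map_interpretation_B xs := by
  rw [pvA_eq_fold, pvA_eq_fold]
  simp only [List.reverse_cons, List.foldl_append, List.foldl_cons, List.foldl_nil, pvStepA]
  rw [pvStepA_snd, List.sum_reverse]
  simp

theorem pvAlt_eq_A (xs : List Int) (s : Int) (hs : s = xs.sum) :
    pvAltGo s xs = map_interpretation_B xs := by
  induction xs generalizing s with
  | nil => simp [pvAltGo, map_interpretation_B]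
  | cons x t ih =>
    subst hs
    rw [pvAltGo, pvA_cons, ih _ (by simp [List.sum_cons])]
    have h5 : ∀ d : Int, d + 6 - 1 = d + 5 := fun d => by ring
    simp [List.sum_cons, add_comm, h5]

-- ===== VERDICT (by name: the statement is the Claim_ definition above) =====
theorem map_interpretation_B_spec : Claim_equal_map_interpretation_B := by
  intro values _ _
  unfold Spec_map_interpretation_B map_interpretation_B_alt
  rw [pvAlt_eq_A values values.sum rfl]
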